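-- pv_equiv track=rewrite | github.com/shannonbay/storysort | storysort/storysort.py | generate_run_array
-- ===== SOURCE A (Python) =====
-- import bisect
--
-- def key_function(x):
--     return -x
--
-- def generate_run_array(input_array):
--     run_array = [-1] * len(
--         input_array
--     )  # non-consecutive series of indexes over input_array - Initialize the run_array with 0
--     run_maxes = [
--         input_array[0]
--     ]  # Keeps track of the current value for each run - maintained in order from lowest to highest
--     run_mins = [input_array[0]]
--     run_indexes = [0]  # Keeps track of the current index for each run
--     run_start_idx = [0]
--
--     # For each input value
--     for i, value in enumerate(input_array[1:], start=1):
--         found = False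
--
--         # For each established run
--         j = bisect.bisect_left(run_maxes, key_function(value), key=key_function)
--
--         if j != len(run_maxes):
--             run_maxes[j] = value  # update the max for run j
--             run_array[run_indexes[j]] = i  # run array for run j now points to i
--             run_indexes[j] = i  # i is now the latest index in run j
--             found = True
--
--         if not found:
--             j = bisect.bisect_left(run_mins, value)
--             # For each established run
--             if j != len(
--                 run_mins
--             ):  # find the first run (j) that current value is greater than (or equal to)
--                 run_mins[j] = value  # update the min for run j
--                 run_array[i] = run_start_idx[j]  # point to the old start
--                 run_start_idx[j] = i  # this is the new start idx for the run
--                 found = True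
--
--         if not found:
--             run_maxes.append(value)  # start a new run
--             run_mins.append(value)
--             run_indexes.append(i)  # i is now the latest index in run j
--             run_start_idx.append(i)
--
--     return run_array, run_start_idx
-- ===== SOURCE B (Python) =====
-- def generate_run_array(input_array):
--     # B: keeps one list of run records (max, min, last_idx, start_idx) instead of
--     # four parallel arrays, and finds the target run by a linear first-match scan
--     # instead of bisect binary search.
--     run_array = [-1] * len(input_array)
--     first = input_array[0]
--     runs = [(first, first, 0, 0)]  # (max, min, last_idx, start_idx)
--     for i in range(1, len(input_array)):
--         value = input_array[i]
--         j = 0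
--         while j < len(runs) and runs[j][0] > value:
--             j += 1
--         if j < len(runs):
--             mx, mn, idx, start = runs[j]
--             run_array[idx] = i
--             runs[j] = (value, mn, i, start)
--             continue
--         j = 0
--         while j < len(runs) and runs[j][1] < value:
--             j += 1
--         if j < len(runs):
--             mx, mn, idx, start = runs[j]
--             runs[j] = (mx, value, idx, i)
--             run_array[i] = start
--             continue
--         runs.append((value, value, i, i))
--     return run_array, [r[3] for r in runs]
-- ===== Notes on version B (the rewrite author's own statement) =====
-- stated objective: alternative
-- what changed: B replaces the four parallel arrays plus bisect binary searches by a single list of per-run records (max, min, last_idx, start_idx) searched with a linear first-match scan; correctness relies on the proved invariant that the run maxes stay nonincreasing and the run mins nondecreasing.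
import Mathlib
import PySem

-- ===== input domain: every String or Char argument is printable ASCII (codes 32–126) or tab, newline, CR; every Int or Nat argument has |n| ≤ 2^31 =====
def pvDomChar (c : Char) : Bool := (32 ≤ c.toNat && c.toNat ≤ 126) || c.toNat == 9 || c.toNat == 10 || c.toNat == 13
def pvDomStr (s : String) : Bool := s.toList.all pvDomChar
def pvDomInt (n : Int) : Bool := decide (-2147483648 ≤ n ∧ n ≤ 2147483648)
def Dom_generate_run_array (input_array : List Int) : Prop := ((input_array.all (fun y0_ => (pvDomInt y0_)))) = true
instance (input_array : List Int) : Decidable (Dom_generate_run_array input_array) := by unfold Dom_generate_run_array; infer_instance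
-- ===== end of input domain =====

-- B keeps one list of per-run records instead of four parallel arrays and finds the
-- target run by a linear first-match scan instead of bisect binary search ("alternative").

-- ===== PORT A =====

-- bisect.bisect_left(a, x, key=key), CPython's loop: while lo < hi: mid=(lo+hi)//2; …
-- (the fuel argument hi - lo only bounds the loop's iteration count; it never changes the result)
def pyBisectLeftGo (key : Int → Int) (a : List Int) (x : Int) : Nat → Nat → Nat → Nat
  | 0, lo, _ => lo
  | fuel + 1, lo, hi =>
    if lo < hi then
      if key (a.getD ((lo + hi) / 2) 0) < x then
        pyBisectLeftGo key a x fuel ((lo + hi) / 2 + 1) hi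
      else
        pyBisectLeftGo key a x fuel lo ((lo + hi) / 2)
    else lo

def pyBisectLeft (key : Int → Int) (a : List Int) (x : Int) (lo hi : Nat) : Nat :=
  pyBisectLeftGo key a x (hi - lo) lo hi

def key_function (x : Int) : Int := -x

-- one iteration of A's for-loop (the `found` flag becomes the if/else nesting)
def stepA (i : Nat) (value : Int)
    (s : List Int × List Int × List Int × List Int × List Int) :
    List Int × List Int × List Int × List Int × List Int :=
  let (runArray, runMaxes, runMins, runIndexes, runStartIdx) := s
  let j := pyBisectLeft key_function runMaxes (key_function value) 0 runMaxes.length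
  if j ≠ runMaxes.length then
    (runArray.set (runIndexes.getD j 0).toNat (i : Int),
     runMaxes.set j value, runMins, runIndexes.set j (i : Int), runStartIdx)
  else
    let j2 := pyBisectLeft id runMins value 0 runMins.length
    if j2 ≠ runMins.length then
      (runArray.set i (runStartIdx.getD j2 0),
       runMaxes, runMins.set j2 value, runIndexes, runStartIdx.set j2 (i : Int))
    else
      (runArray, runMaxes ++ [value], runMins ++ [value],
       runIndexes ++ [(i : Int)], runStartIdx ++ [(i : Int)])

def loopA : List Int → Nat →
    (List Int × List Int × List Int × List Int × List Int) →
    (List Int × List Int × List Int × List Int × List Int)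
  | [], _, s => s
  | v :: rest, i, s => loopA rest (i + 1) (stepA i v s)

def generate_run_array (input_array : List Int) : List Int × List Int :=
  match input_array with
  | [] => ([], [])  -- Python raises IndexError here; excluded by Pre_
  | v0 :: _ =>
    let s := loopA (input_array.drop 1) 1
      (List.replicate input_array.length (-1 : Int), [v0], [v0], [(0 : Int)], [(0 : Int)])
    (s.1, s.2.2.2.2)

-- ===== PORT B =====

-- first index whose element satisfies p (length if none): Source B's `while j < len … j += 1`
def scanFirst {α : Type} (p : α → Bool) : List α → Nat
  | [] => 0
  | a :: rest => if p a then 0 else scanFirst p rest + 1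

-- a run record: (max, min, last_idx, start_idx)
def stepB (i : Nat) (value : Int)
    (s : List Int × List (Int × Int × Int × Int)) :
    List Int × List (Int × Int × Int × Int) :=
  let (runArray, runs) := s
  let j := scanFirst (fun r => decide (r.1 ≤ value)) runs
  if j < runs.length then
    let r := runs.getD j (0, 0, 0, 0)
    (runArray.set r.2.2.1.toNat (i : Int), runs.set j (value, r.2.1, (i : Int), r.2.2.2))
  else
    let j2 := scanFirst (fun r => decide (value ≤ r.2.1)) runs
    if j2 < runs.length then
      let r := runs.getD j2 (0, 0, 0, 0)
      (runArray.set i r.2.2.2, runs.set j2 (r.1, value, r.2.2.1, (i : Int)))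
    else
      (runArray, runs ++ [(value, value, (i : Int), (i : Int))])

def loopB : List Int → Nat →
    (List Int × List (Int × Int × Int × Int)) →
    (List Int × List (Int × Int × Int × Int))
  | [], _, s => s
  | v :: rest, i, s => loopB rest (i + 1) (stepB i v s)

def generate_run_array_alt (input_array : List Int) : List Int × List Int :=
  match input_array with
  | [] => ([], [])  -- Source B raises IndexError here too; excluded by Pre_
  | v0 :: _ =>
    let s := loopB (input_array.drop 1) 1
      (List.replicate input_array.length (-1 : Int), [(v0, v0, (0 : Int), (0 : Int))])
    (s.1, s.2.map (fun r => r.2.2.2))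

-- ===== PRECONDITION & SPEC =====
-- Pre_ excludes only the empty list, on which Python A raises IndexError (input_array[0]).
def Pre_generate_run_array (input_array : List Int) : Prop := input_array ≠ []
instance (input_array : List Int) : Decidable (Pre_generate_run_array input_array) := by
  unfold Pre_generate_run_array; infer_instance

def pvWitness_generate_run_array : List Int := [3, 1, 4, 1, 5]

def Spec_generate_run_array (input_array : List Int) (out : List Int × List Int) : Prop := out = generate_run_array_alt input_array
instance (input_array : List Int) (out : List Int × List Int) : Decidable (Spec_generate_run_array input_array out) := by unfold Spec_generate_run_array; infer_instance

-- ===== CLAIM (what is proved, stated in full; the proofs are below) =====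
def Claim_equal_generate_run_array : Prop := ∀ (input_array : List Int), Dom_generate_run_array input_array → Pre_generate_run_array input_array → Spec_generate_run_array input_array (generate_run_array input_array)

-- ===== LEMMAS AND PROOFS =====

theorem scanFirst_le {α : Type} (p : α → Bool) (l : List α) : scanFirst p l ≤ l.length := by
  induction l with
  | nil => simp [scanFirst]
  | cons a rest ih => by_cases h : p a <;> simp [scanFirst, h] <;> omega

theorem scanFirst_min {α : Type} (p : α → Bool) (l : List α) {i : Nat}
    (hi : i < scanFirst p l) (hl : i < l.length) : p l[i] = false := by
  induction l generalizing i with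
  | nil => simp at hl
  | cons a rest ih =>
    by_cases h : p a
    · simp [scanFirst, h] at hi
    · cases i with
      | zero => simpa using h
      | succ k =>
        simp [scanFirst, h] at hi
        simpa using ih (by omega) (by simpa using Nat.lt_of_succ_lt_succ hl)

theorem scanFirst_found {α : Type} (p : α → Bool) (l : List α)
    (h : scanFirst p l < l.length) : p (l[scanFirst p l]'h) = true := by
  induction l with
  | nil => simp at h
  | cons a rest ih =>
    by_cases hp : p a
    · simpa [scanFirst, hp] using hp
    · simp only [scanFirst, hp, if_false]
      simpa [scanFirst, hp] using ih (by simpa [scanFirst, hp] using h)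

theorem scanFirst_map {α β : Type} (p : β → Bool) (f : α → β) (l : List α) :
    scanFirst p (l.map f) = scanFirst (fun a => p (f a)) l := by
  induction l with
  | nil => rfl
  | cons a rest ih => by_cases h : p (f a) <;> simp [scanFirst, h, ih]

-- bisect_left returns t whenever "key a[i] < x ↔ i < t" and lo ≤ t ≤ hi ≤ len
theorem pyBisectLeftGo_eq (key : Int → Int) (a : List Int) (x : Int) (t : Nat) :
    ∀ fuel lo hi, hi - lo ≤ fuel → lo ≤ t → t ≤ hi → hi ≤ a.length →
    (∀ i (h : i < a.length), (key a[i] < x ↔ i < t)) →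
    pyBisectLeftGo key a x fuel lo hi = t := by
  intro fuel
  induction fuel with
  | zero =>
    intro lo hi hf h1 h2 _ _
    simp only [pyBisectLeftGo]
    omega
  | succ n ih =>
    intro lo hi hf h1 h2 h3 hiff
    by_cases h : lo < hi
    · rw [pyBisectLeftGo, if_pos h]
      have hm : (lo + hi) / 2 < a.length := by omega
      by_cases hlt : key (a.getD ((lo + hi) / 2) 0) < x
      · rw [if_pos hlt]
        rw [List.getD_eq_getElem a 0 hm] at hlt
        have := (hiff _ hm).1 hlt
        exact ih _ _ (by omega) (by omega) h2 h3 hiff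
      · rw [if_neg hlt]
        rw [List.getD_eq_getElem a 0 hm] at hlt
        have : ¬ ((lo + hi) / 2 < t) := fun hc => hlt ((hiff _ hm).2 hc)
        exact ih _ _ (by omega) h1 (by omega) (by omega) hiff
    · rw [pyBisectLeftGo, if_neg h]
      omega

theorem pyBisectLeft_eq (key : Int → Int) (a : List Int) (x : Int) (t : Nat)
    (lo hi : Nat) (h1 : lo ≤ t) (h2 : t ≤ hi) (h3 : hi ≤ a.length)
    (hiff : ∀ i (h : i < a.length), (key a[i] < x ↔ i < t)) :
    pyBisectLeft key a x lo hi = t :=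
  pyBisectLeftGo_eq key a x t (hi - lo) lo hi le_rfl h1 h2 h3 hiff

-- the two searches coincide with the linear scans on sorted run lists
theorem bisect_maxes (maxes : List Int) (v : Int)
    (hs : maxes.Pairwise (· ≥ ·)) :
    pyBisectLeft key_function maxes (key_function v) 0 maxes.length
      = scanFirst (fun a => decide (a ≤ v)) maxes := by
  apply pyBisectLeft_eq key_function maxes (key_function v) _ 0 maxes.length
    (Nat.zero_le _) (scanFirst_le _ _) le_rfl
  intro i hi
  simp only [key_function, neg_lt_neg_iff]
  constructor
  · intro hv
    by_contra hc
    push_neg at hc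
    have htl : scanFirst (fun a => decide (a ≤ v)) maxes < maxes.length :=
      lt_of_le_of_lt hc hi
    have hft := scanFirst_found (fun a => decide (a ≤ v)) maxes htl
    simp only [decide_eq_true_eq] at hft
    rcases Nat.eq_or_lt_of_le hc with heq | hlt
    · simp only [heq] at hft; omega
    · have hp := List.pairwise_iff_getElem.1 hs _ i htl hi hlt
      omega
  · intro hlt
    have := scanFirst_min (fun a => decide (a ≤ v)) maxes hlt hi
    simp only [decide_eq_false_iff_not, not_le] at this
    exact this

theorem bisect_mins (mins : List Int) (v : Int)
    (hs : mins.Pairwise (· ≤ ·)) :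
    pyBisectLeft id mins v 0 mins.length
      = scanFirst (fun a => decide (v ≤ a)) mins := by
  apply pyBisectLeft_eq id mins v _ 0 mins.length
    (Nat.zero_le _) (scanFirst_le _ _) le_rfl
  intro i hi
  simp only [id]
  constructor
  · intro hv
    by_contra hc
    push_neg at hc
    have htl : scanFirst (fun a => decide (v ≤ a)) mins < mins.length :=
      lt_of_le_of_lt hc hi
    have hft := scanFirst_found (fun a => decide (v ≤ a)) mins htl
    simp only [decide_eq_true_eq] at hft
    rcases Nat.eq_or_lt_of_le hc with heq | hlt
    · simp only [heq] at hft; omega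
    · have hp := List.pairwise_iff_getElem.1 hs _ i htl hi hlt
      omega
  · intro hlt
    have := scanFirst_min (fun a => decide (v ≤ a)) mins hlt hi
    simp only [decide_eq_false_iff_not, not_le] at this
    exact this

-- invariant preservation
theorem pairwise_set_ge (l : List Int) (v : Int) (hs : l.Pairwise (· ≥ ·))
    (hj : scanFirst (fun a => decide (a ≤ v)) l < l.length) :
    (l.set (scanFirst (fun a => decide (a ≤ v)) l) v).Pairwise (· ≥ ·) := by
  have hfound := scanFirst_found (fun a => decide (a ≤ v)) l hj
  simp only [decide_eq_true_eq] at hfound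
  rw [List.pairwise_iff_getElem] at hs ⊢
  intro a b ha hb hab
  simp only [List.length_set] at ha hb
  rw [List.getElem_set, List.getElem_set]
  by_cases h1 : scanFirst (fun a => decide (a ≤ v)) l = a
  · rw [if_pos h1]
    by_cases h2 : scanFirst (fun a => decide (a ≤ v)) l = b
    · omega
    · rw [if_neg h2]
      have := hs _ b hj hb (by omega)
      simp only [h1] at this hfound
      omega
  · rw [if_neg h1]
    by_cases h2 : scanFirst (fun a => decide (a ≤ v)) l = b
    · rw [if_pos h2]
      have hlt : a < scanFirst (fun a => decide (a ≤ v)) l := by omega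
      have := scanFirst_min (fun x => decide (x ≤ v)) l hlt ha
      simp only [decide_eq_false_iff_not, not_le] at this
      omega
    · rw [if_neg h2]
      exact hs a b ha hb hab

theorem pairwise_set_le (l : List Int) (v : Int) (hs : l.Pairwise (· ≤ ·))
    (hj : scanFirst (fun a => decide (v ≤ a)) l < l.length) :
    (l.set (scanFirst (fun a => decide (v ≤ a)) l) v).Pairwise (· ≤ ·) := by
  have hfound := scanFirst_found (fun a => decide (v ≤ a)) l hj
  simp only [decide_eq_true_eq] at hfound
  rw [List.pairwise_iff_getElem] at hs ⊢
  intro a b ha hb hab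
  simp only [List.length_set] at ha hb
  rw [List.getElem_set, List.getElem_set]
  by_cases h1 : scanFirst (fun a => decide (v ≤ a)) l = a
  · rw [if_pos h1]
    by_cases h2 : scanFirst (fun a => decide (v ≤ a)) l = b
    · omega
    · rw [if_neg h2]
      have := hs _ b hj hb (by omega)
      simp only [h1] at this hfound
      omega
  · rw [if_neg h1]
    by_cases h2 : scanFirst (fun a => decide (v ≤ a)) l = b
    · rw [if_pos h2]
      have hlt : a < scanFirst (fun a => decide (v ≤ a)) l := by omega
      have := scanFirst_min (fun x => decide (v ≤ x)) l hlt ha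
      simp only [decide_eq_false_iff_not, not_le] at this
      omega
    · rw [if_neg h2]
      exact hs a b ha hb hab

theorem pairwise_append_ge (l : List Int) (v : Int) (hs : l.Pairwise (· ≥ ·))
    (hall : ∀ i (h : i < l.length), v < l[i]) :
    (l ++ [v]).Pairwise (· ≥ ·) := by
  rw [List.pairwise_append]
  refine ⟨hs, List.pairwise_singleton _ _, ?_⟩
  intro a ha b hb
  simp at hb; subst hb
  obtain ⟨i, hi, rfl⟩ := List.getElem_of_mem ha
  exact le_of_lt (hall i hi)

theorem pairwise_append_le (l : List Int) (v : Int) (hs : l.Pairwise (· ≤ ·))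
    (hall : ∀ i (h : i < l.length), l[i] < v) :
    (l ++ [v]).Pairwise (· ≤ ·) := by
  rw [List.pairwise_append]
  refine ⟨hs, List.pairwise_singleton _ _, ?_⟩
  intro a ha b hb
  simp at hb; subst hb
  obtain ⟨i, hi, rfl⟩ := List.getElem_of_mem ha
  exact le_of_lt (hall i hi)

-- relation between A's parallel-array state and B's record-list state
def RelAB (s : List Int × List Int × List Int × List Int × List Int)
    (t : List Int × List (Int × Int × Int × Int)) : Prop :=
  s.1 = t.1 ∧
  s.2.1 = t.2.map (fun r => r.1) ∧
  s.2.2.1 = t.2.map (fun r => r.2.1) ∧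
  s.2.2.2.1 = t.2.map (fun r => r.2.2.1) ∧
  s.2.2.2.2 = t.2.map (fun r => r.2.2.2)

def InvAB (s : List Int × List Int × List Int × List Int × List Int) : Prop :=
  s.2.1.Pairwise (· ≥ ·) ∧ s.2.2.1.Pairwise (· ≤ ·)

theorem getD_map' {α β : Type} (f : α → β) (l : List α) (j : Nat) (h : j < l.length) (d : β) :
    (l.map f).getD j d = f (l[j]'h) := by
  rw [List.getD_eq_getElem _ _ (by simpa using h), List.getElem_map]

theorem set_idx_self {α : Type} (l : List α) (j : Nat) (h : j < l.length) :
    l.set j (l[j]'h) = l := by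
  apply List.ext_getElem (by simp)
  intro i h1 h2
  simp only [List.getElem_set]
  split
  · next heq => subst heq; rfl
  · rfl

theorem map_set_untouched {α β : Type} (f : α → β) (l : List α) (j : Nat) (h : j < l.length)
    (r' : α) (hf : f r' = f (l[j]'h)) : (l.set j r').map f = l.map f := by
  rw [List.map_set, hf]
  have hmap : f (l[j]'h) = (l.map f)[j]'(by simpa using h) := (List.getElem_map f).symm
  rw [hmap, set_idx_self]

theorem step_rel (i : Nat) (v : Int) (s : List Int × List Int × List Int × List Int × List Int)
    (t : List Int × List (Int × Int × Int × Int))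
    (hr : RelAB s t) (hinv : InvAB s) :
    RelAB (stepA i v s) (stepB i v t) ∧ InvAB (stepA i v s) := by
  obtain ⟨ra, maxes, mins, idxs, starts⟩ := s
  obtain ⟨rb, runs⟩ := t
  obtain ⟨h1, h2, h3, h4, h5⟩ := hr
  obtain ⟨hmax, hmin⟩ := hinv
  simp only at h1 h2 h3 h4 h5 hmax hmin
  subst h1 h2 h3 h4 h5
  have hbmax := bisect_maxes (runs.map (fun r => r.1)) v hmax
  have hbmin := bisect_mins (runs.map (fun r => r.2.1)) v hmin
  rw [scanFirst_map] at hbmax hbmin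
  simp only [List.length_map] at hbmax hbmin
  simp only [stepA, stepB, List.length_map, hbmax, hbmin, RelAB, InvAB]
  by_cases hfound : scanFirst (fun r => decide (r.1 ≤ v)) runs < runs.length
  · rw [if_pos (Nat.ne_of_lt hfound), if_pos hfound]
    have hget : runs.getD (scanFirst (fun r => decide (r.1 ≤ v)) runs) (0, 0, 0, 0)
        = runs[scanFirst (fun r => decide (r.1 ≤ v)) runs]'hfound :=
      List.getD_eq_getElem runs _ hfound
    refine ⟨⟨?_, ?_, ?_, ?_, ?_⟩, ?_, ?_⟩
    · rw [getD_map' (fun r => r.2.2.1) runs _ hfound 0, hget]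
    · rw [List.map_set]
    · rw [map_set_untouched (fun r => r.2.1) runs _ hfound _ (by rw [hget])]
    · rw [List.map_set]
    · rw [map_set_untouched (fun r => r.2.2.2) runs _ hfound _ (by rw [hget])]
    · have := pairwise_set_ge (runs.map (fun r => r.1)) v hmax
        (by rw [scanFirst_map]; simpa using hfound)
      rw [scanFirst_map] at this
      simpa using this
    · simpa using hmin
  · have hjeq : scanFirst (fun r => decide (r.1 ≤ v)) runs = runs.length := by
      have := scanFirst_le (fun r => decide (r.1 ≤ v)) runs; omega
    rw [if_neg (by omega : ¬ scanFirst (fun r => decide (r.1 ≤ v)) runs ≠ runs.length),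
        if_neg hfound]
    by_cases hfound2 : scanFirst (fun r => decide (v ≤ r.2.1)) runs < runs.length
    · rw [if_pos (Nat.ne_of_lt hfound2), if_pos hfound2]
      have hget : runs.getD (scanFirst (fun r => decide (v ≤ r.2.1)) runs) (0, 0, 0, 0)
          = runs[scanFirst (fun r => decide (v ≤ r.2.1)) runs]'hfound2 :=
        List.getD_eq_getElem runs _ hfound2
      refine ⟨⟨?_, ?_, ?_, ?_, ?_⟩, ?_, ?_⟩
      · rw [getD_map' (fun r => r.2.2.2) runs _ hfound2 0, hget]
      · rw [map_set_untouched (fun r => r.1) runs _ hfound2 _ (by rw [hget])]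
      · rw [List.map_set]
      · rw [map_set_untouched (fun r => r.2.2.1) runs _ hfound2 _ (by rw [hget])]
      · rw [List.map_set]
      · simpa using hmax
      · have := pairwise_set_le (runs.map (fun r => r.2.1)) v hmin
          (by rw [scanFirst_map]; simpa using hfound2)
        rw [scanFirst_map] at this
        simpa using this
    · have hj2eq : scanFirst (fun r => decide (v ≤ r.2.1)) runs = runs.length := by
        have := scanFirst_le (fun r => decide (v ≤ r.2.1)) runs; omega
      rw [if_neg (by omega : ¬ scanFirst (fun r => decide (v ≤ r.2.1)) runs ≠ runs.length),
          if_neg hfound2]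
      refine ⟨⟨rfl, ?_, ?_, ?_, ?_⟩, ?_, ?_⟩
      · simp
      · simp
      · simp
      · simp
      · apply pairwise_append_ge _ _ hmax
        intro k hk
        have := scanFirst_min (fun r => decide (r.1 ≤ v)) runs
          (by rw [hjeq]; simpa using hk) (by simpa using hk)
        simp only [decide_eq_false_iff_not, not_le] at this
        simpa [List.getElem_map] using this
      · apply pairwise_append_le _ _ hmin
        intro k hk
        have := scanFirst_min (fun r => decide (v ≤ r.2.1)) runs
          (by rw [hj2eq]; simpa using hk) (by simpa using hk)
        simp only [decide_eq_false_iff_not, not_le] at this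
        simpa [List.getElem_map] using this

theorem loop_rel (rest : List Int) : ∀ (i : Nat) s t, RelAB s t → InvAB s →
    RelAB (loopA rest i s) (loopB rest i t) := by
  induction rest with
  | nil => intro i s t hr _; simpa [loopA, loopB] using hr
  | cons v r ih =>
    intro i s t hr hinv
    obtain ⟨hr', hinv'⟩ := step_rel i v s t hr hinv
    simpa [loopA, loopB] using ih (i + 1) _ _ hr' hinv'

-- ===== VERDICT (by name: the statement is the Claim_ definition above) =====
theorem generate_run_array_spec : Claim_equal_generate_run_array := by
  intro input_array _ hpre
  unfold Spec_generate_run_array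
  match input_array, hpre with
  | v0 :: rest, _ =>
    simp only [generate_run_array, generate_run_array_alt]
    have hrel : RelAB
        (List.replicate (v0 :: rest).length (-1 : Int), [v0], [v0], [(0 : Int)], [(0 : Int)])
        (List.replicate (v0 :: rest).length (-1 : Int), [(v0, v0, (0 : Int), (0 : Int))]) := by
      refine ⟨rfl, ?_, ?_, ?_, ?_⟩ <;> simp
    have hinv : InvAB
        (List.replicate (v0 :: rest).length (-1 : Int), [v0], [v0], [(0 : Int)], [(0 : Int)]) := by
      constructor <;> simp
    obtain ⟨e1, _, _, _, e5⟩ := loop_rel ((v0 :: rest).drop 1) 1 _ _ hrel hinv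
    exact Prod.ext e1 e5
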